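-- pv_equiv track=rewrite | github.com/GianellaRocha/python-juego-adivinanza-numero | ahorcado_juego/ahorcado.py | progreso
-- ===== SOURCE A (Python) =====
-- def progreso(palabra, letras_adivinadas):
--     adivinado = ""
--     for letra in palabra:
--         if letra in letras_adivinadas:
--              adivinado += letra
--         else:
--             adivinado += "-"
--     return adivinado
-- ===== SOURCE B (Python) =====
-- def progreso(palabra, letras_adivinadas):
--     res = ["-"] * len(palabra)
--     for g in dict.fromkeys(letras_adivinadas):
--         if len(g) != 1:
--             continue  # a multi-character (or empty) guess can never equal a letter
--         for i, c in enumerate(palabra):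
--             if c == g:
--                 res[i] = c
--     return "".join(res)
-- ===== Notes on version B (the rewrite author's own statement) =====
-- stated objective: alternative
-- what changed: B preallocates a dash buffer and scatters each distinct single-character guess (dict.fromkeys dedup, skipping non-single-char guesses, which can never match) into every matching position of the word, instead of A's single left-to-right pass appending per-character membership results.
import Mathlib
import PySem

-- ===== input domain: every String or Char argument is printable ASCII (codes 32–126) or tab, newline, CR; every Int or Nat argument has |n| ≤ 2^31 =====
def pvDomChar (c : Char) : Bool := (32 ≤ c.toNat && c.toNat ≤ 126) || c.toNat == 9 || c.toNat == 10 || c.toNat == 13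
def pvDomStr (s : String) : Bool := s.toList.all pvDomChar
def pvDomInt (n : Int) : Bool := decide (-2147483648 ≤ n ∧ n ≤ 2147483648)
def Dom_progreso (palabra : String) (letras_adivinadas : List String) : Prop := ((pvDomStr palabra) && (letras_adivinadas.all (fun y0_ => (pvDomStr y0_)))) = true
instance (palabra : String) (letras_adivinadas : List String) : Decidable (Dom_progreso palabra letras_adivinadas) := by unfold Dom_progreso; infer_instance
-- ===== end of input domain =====

-- B scatters guessed letters into a preallocated dash buffer (loop over guesses, inner scan over the word) instead of A's single append-per-character pass; objective: alternative decomposition, same cost.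


-- ===== PORT A =====
-- A: one pass over the word, appending the letter if it is in the guessed list, else '-'.
-- (the accumulating Python str is carried as a List Char and packed with String.ofList at the end,
--  since Lean's own String.append is kernel-opaque)
def progreso (palabra : String) (letras_adivinadas : List String) : String :=
  String.ofList (palabra.toList.foldl
    (fun acc letra =>
      if String.ofList [letra] ∈ letras_adivinadas then acc ++ [letra] else acc ++ ['-'])
    [])

-- ===== PORT B =====
-- B: res = ['-'] * len(palabra); for g in dict.fromkeys(letras): for i,c in enumerate(palabra): if c == g: res[i] = c
-- B skips guesses that are not single characters (they never match a letter);
-- dict.fromkeys = PySem.List.dedup; the inner indexed update loop is the zip-with-the-word rewrite pass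
def progreso_alt (palabra : String) (letras_adivinadas : List String) : String :=
  let word := palabra.toList
  String.ofList ((PySem.List.dedup letras_adivinadas).foldl
    (fun res g =>
      if g.toList.length = 1 then
        (word.zip res).map (fun p => if String.ofList [p.1] = g then p.1 else p.2)
      else res)
    (List.replicate word.length '-'))

-- ===== PRECONDITION & SPEC =====
def Spec_progreso (palabra : String) (letras_adivinadas : List String) (out : String) : Prop := out = progreso_alt palabra letras_adivinadas
instance (palabra : String) (letras_adivinadas : List String) (out : String) : Decidable (Spec_progreso palabra letras_adivinadas out) := by unfold Spec_progreso; infer_instance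

-- ===== CLAIM (what is proved, stated in full; the proofs are below) =====
def Claim_equal_progreso : Prop := ∀ (palabra : String) (letras_adivinadas : List String), Dom_progreso palabra letras_adivinadas → Spec_progreso palabra letras_adivinadas (progreso palabra letras_adivinadas)

-- ===== LEMMAS AND PROOFS =====

-- A's append loop produces the pointwise map.
theorem progA_fold (letras : List String) :
    ∀ (word : List Char) (acc : List Char),
      word.foldl (fun acc letra =>
        if String.ofList [letra] ∈ letras then acc ++ [letra] else acc ++ ['-']) acc
      = acc ++ word.map (fun c => if String.ofList [c] ∈ letras then c else '-') := by
  intro word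
  induction word with
  | nil => intro acc; simp
  | cons c rest ih =>
      intro acc
      simp only [List.foldl_cons, List.map_cons]
      by_cases h : String.ofList [c] ∈ letras <;> simp [h, ih]

-- one scatter pass over a mapped buffer rewrites the map pointwise
theorem scatter_map (g : String) :
    ∀ (word : List Char) (f : Char → Char),
      ((word.zip (word.map f)).map (fun p => if String.ofList [p.1] = g then p.1 else p.2))
      = word.map (fun c => if String.ofList [c] = g then c else f c) := by
  intro word
  induction word with
  | nil => intro f; simp
  | cons c rest ih => intro f; simp [ih]

-- B's fold over the guesses, starting from any mapped buffer
theorem progB_fold (word : List Char) :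
    ∀ (gs : List String) (f : Char → Char),
      gs.foldl (fun res g =>
          if g.toList.length = 1 then
            (word.zip res).map (fun p => if String.ofList [p.1] = g then p.1 else p.2)
          else res)
        (word.map f)
      = word.map (fun c => if String.ofList [c] ∈ gs then c else f c) := by
  intro gs
  induction gs with
  | nil => intro f; simp
  | cons g rest ih =>
      intro f
      by_cases h1 : g.toList.length = 1
      · simp only [List.foldl_cons, h1, if_true, scatter_map g word f, ih]
        apply List.map_congr_left
        intro c _
        by_cases hg : String.ofList [c] = g <;> by_cases hr : String.ofList [c] ∈ rest <;>
          simp [hg, hr, List.mem_cons]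
      · simp only [List.foldl_cons, h1, if_false, ih]
        apply List.map_congr_left
        intro c _
        have hg : String.ofList [c] ≠ g := by
          intro h; apply h1; rw [← h]; simp
        by_cases hr : String.ofList [c] ∈ rest <;> simp [hg, hr, List.mem_cons]

-- ===== VERDICT (by name: the statement is the Claim_ definition above) =====
theorem progreso_spec : Claim_equal_progreso := by
  intro palabra letras _
  show progreso palabra letras = progreso_alt palabra letras
  unfold progreso progreso_alt
  simp only []
  rw [progA_fold letras palabra.toList [], show List.replicate palabra.toList.length '-' = palabra.toList.map (fun _ => '-') from (List.map_const' ..).symm,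
      progB_fold palabra.toList (PySem.List.dedup letras) (fun _ => '-')]
  simp
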